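-- pv_equiv track=rewrite | github.com/EdSpurrier/vision-core-python-cv-ml | libraries/barcode_scanner.py | Search_number_String
-- ===== SOURCE A (Python) =====
-- def Search_number_String(String):
--     index_list = []
--     del index_list[:]
--     for i, x in enumerate(String):
--         if x.isdigit() == True:
--             index_list.append(i)
--     start = index_list[0]
--     end = index_list[-1] + 1
--     number = String[start:end]
--     return number
-- ===== SOURCE B (Python) =====
-- def Search_number_String(String):
--     # Two-pointer scan: find the first and last digit positions directly,
--     # without materialising the list of all digit indices.
--     n = len(String)
--     first = None
--     for i in range(n):
--         if String[i].isdigit():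
--             first = i
--             break
--     if first is None:
--         return ""
--     last = first
--     for i in range(n - 1, -1, -1):
--         if String[i].isdigit():
--             last = i
--             break
--     return String[first:last + 1]
-- ===== Notes on version B (the rewrite author's own statement) =====
-- stated objective: simpler
-- what changed: Replaces A's materialised list of all digit indices with two early-exit scans (left-to-right for the first digit, right-to-left for the last), keeping only two integers; on strings with no digit, where A raises IndexError, B returns the empty string (outside Pre_).
import Mathlib
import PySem

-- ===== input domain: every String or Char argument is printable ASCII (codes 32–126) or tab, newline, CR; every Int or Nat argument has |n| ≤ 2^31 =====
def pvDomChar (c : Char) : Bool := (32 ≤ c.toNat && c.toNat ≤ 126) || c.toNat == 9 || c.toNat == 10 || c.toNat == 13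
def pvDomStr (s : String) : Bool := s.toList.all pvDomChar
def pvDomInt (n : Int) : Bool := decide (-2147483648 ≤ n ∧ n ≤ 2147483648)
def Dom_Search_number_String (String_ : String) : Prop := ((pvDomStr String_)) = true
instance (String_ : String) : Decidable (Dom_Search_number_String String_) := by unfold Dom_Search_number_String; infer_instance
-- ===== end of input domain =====

-- B is a two-pointer rewrite of A: two early-exit scans replace A's full list of digit indices,
-- and B returns "" where A raises IndexError (no digit in the string).

-- ===== PORT A =====
-- A builds the list of all digit indices, then slices from the first to the last+1.
-- index_list[0] / index_list[-1] raise IndexError when no digit exists: excluded by Pre_.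
def Search_number_String (String_ : String) : String :=
  let index_list : List Int :=
    (PySem.List.enumerate String_.toList).foldl
      (fun acc p => if PySem.Chars.isdigit p.2 then acc ++ [p.1] else acc) []
  match PySem.List.pyGet? index_list 0, PySem.List.pyGet? index_list (-1) with
  | some start, some lastIdx => PySem.Str.slice String_ (some start) (some (lastIdx + 1))
  | _, _ => ""   -- unreachable under Pre_ (Python raises IndexError here)

-- ===== PORT B =====
-- forward scan with break: first index (counter starts at i, increasing) whose char is a digit
def pvFirstDigit : List Char → Int → Option Int
  | [], _ => none
  | c :: rest, i => if PySem.Chars.isdigit c then some i else pvFirstDigit rest (i + 1)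

-- backward scan with break: 'for i in range(n-1, -1, -1)' walks the reversed string while the
-- index counter decreases from n-1
def pvLastDigit : List Char → Int → Option Int
  | [], _ => none
  | c :: rest, i => if PySem.Chars.isdigit c then some i else pvLastDigit rest (i - 1)

def Search_number_String_alt (String_ : String) : String :=
  let cs := String_.toList
  match pvFirstDigit cs 0 with
  | none => ""
  | some first =>
    let lastIdx := (pvLastDigit cs.reverse ((cs.length : Int) - 1)).getD first
    PySem.Str.slice String_ (some first) (some (lastIdx + 1))

-- ===== PRECONDITION & SPEC =====
-- Pre_ excludes exactly the strings with no digit, on which A raises IndexError.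
def Pre_Search_number_String (String_ : String) : Prop :=
  String_.toList.any PySem.Chars.isdigit = true
instance (String_ : String) : Decidable (Pre_Search_number_String String_) := by
  unfold Pre_Search_number_String; infer_instance

def pvWitness_Search_number_String : String := "ab12c3d"

def Spec_Search_number_String (String_ : String) (out : String) : Prop :=
  out = Search_number_String_alt String_
instance (String_ : String) (out : String) : Decidable (Spec_Search_number_String String_ out) := by
  unfold Spec_Search_number_String; infer_instance

-- ===== CLAIM (what is proved, stated in full; the proofs are below) =====
def Claim_equal_Search_number_String : Prop :=
  ∀ (String_ : String), Dom_Search_number_String String_ →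
    Pre_Search_number_String String_ →
    Spec_Search_number_String String_ (Search_number_String String_)

-- ===== LEMMAS AND PROOFS =====

-- the list of digit indices, as a filter of the enumeration
def pvIdxList (cs : List Char) (s : Int) : List Int :=
  ((PySem.List.enumerate cs s).filter (fun p => PySem.Chars.isdigit p.2)).map (·.1)

lemma pvIdxList_eq_foldl (cs : List Char) :
    (PySem.List.enumerate cs).foldl
      (fun acc p => if PySem.Chars.isdigit p.2 then acc ++ [p.1] else acc) []
    = pvIdxList cs 0 := by
  rw [PySem.List.foldl_append_if]
  simp [pvIdxList]

lemma pvIdxList_cons (c : Char) (rest : List Char) (s : Int) :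
    pvIdxList (c :: rest) s
    = (if PySem.Chars.isdigit c then [s] else []) ++ pvIdxList rest (s + 1) := by
  by_cases h : PySem.Chars.isdigit c <;>
    simp [pvIdxList, PySem.List.enumerate_cons, h]

lemma pvFirstDigit_eq_head? (cs : List Char) (s : Int) :
    pvFirstDigit cs s = (pvIdxList cs s).head? := by
  induction cs generalizing s with
  | nil => simp [pvFirstDigit, pvIdxList, PySem.List.enumerate_nil]
  | cons c rest ih =>
    rw [pvIdxList_cons]
    by_cases h : PySem.Chars.isdigit c
    · simp [pvFirstDigit, h]
    · simp [pvFirstDigit, h, ih]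

lemma pvLastDigit_append (xs ys : List Char) (i : Int) :
    pvLastDigit (xs ++ ys) i
    = (pvLastDigit xs i).or (pvLastDigit ys (i - xs.length)) := by
  induction xs generalizing i with
  | nil => simp [pvLastDigit]
  | cons c rest ih =>
    by_cases h : PySem.Chars.isdigit c
    · simp [pvLastDigit, h]
    · have harg : (i - 1 - (rest.length : Int)) = i - ((c :: rest).length : Int) := by
        push_cast [List.length_cons]; ring
      simp only [List.cons_append, pvLastDigit, h, ih, harg]
      simp

lemma pvLastDigit_eq_getLast? (cs : List Char) (s : Int) :
    pvLastDigit cs.reverse (s + cs.length - 1) = (pvIdxList cs s).getLast? := by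
  induction cs generalizing s with
  | nil => simp [pvLastDigit, pvIdxList, PySem.List.enumerate_nil]
  | cons c rest ih =>
    rw [pvIdxList_cons]
    have hlen : (s + (c :: rest).length - 1 : Int) = (s + 1) + rest.length - 1 := by
      push_cast [List.length_cons]; ring
    rw [List.reverse_cons, pvLastDigit_append, hlen, ih (s + 1)]
    have hc : ((s + 1 : Int) + rest.length - 1 - rest.reverse.length : Int) = s := by
      push_cast [List.length_reverse]; ring
    rw [hc]
    cases hL : (pvIdxList rest (s + 1)).getLast? with
    | none =>
      have : pvIdxList rest (s + 1) = [] := List.getLast?_eq_none_iff.mp hL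
      by_cases h : PySem.Chars.isdigit c <;> simp [this, pvLastDigit, h]
    | some b =>
      have hne : pvIdxList rest (s + 1) ≠ [] := by
        intro h0; rw [h0] at hL; simp at hL
      have hcons : (s :: pvIdxList rest (s + 1)).getLast? = some b := by
        rw [show s :: pvIdxList rest (s + 1) = [s] ++ pvIdxList rest (s + 1) from rfl,
          List.getLast?_append_of_ne_nil _ hne]
        exact hL
      by_cases h : PySem.Chars.isdigit c <;> simp [pvLastDigit, h, hL, hcons]

lemma pvIdxList_ne_nil (cs : List Char) (s : Int)
    (h : cs.any PySem.Chars.isdigit = true) : pvIdxList cs s ≠ [] := by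
  induction cs generalizing s with
  | nil => simp at h
  | cons c rest ih =>
    rw [pvIdxList_cons]
    rcases List.any_eq_true.mp h with ⟨x, hx, hdx⟩
    rcases List.mem_cons.mp hx with rfl | hx'
    · simp [hdx]
    · have := ih (s + 1) (List.any_eq_true.mpr ⟨x, hx', hdx⟩)
      intro hcontra
      rcases List.append_eq_nil_iff.mp hcontra with ⟨_, h2⟩
      exact this h2

-- ===== VERDICT (by name: the statement is the Claim_ definition above) =====
theorem Search_number_String_spec : Claim_equal_Search_number_String := by
  intro S _ hpre
  have hne : pvIdxList S.toList 0 ≠ [] := pvIdxList_ne_nil S.toList 0 hpre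
  have hl1 : 1 ≤ (pvIdxList S.toList 0).length := List.length_pos_iff.mpr hne
  obtain ⟨a, ha⟩ := Option.ne_none_iff_exists'.mp
    (fun h => hne (List.head?_eq_none_iff.mp h))
  obtain ⟨b, hb⟩ := Option.ne_none_iff_exists'.mp
    (fun h => hne (List.getLast?_eq_none_iff.mp h))
  have h0 : PySem.List.pyGet? (pvIdxList S.toList 0) 0 = some a := by
    have h := PySem.List.pyGet?_natCast (pvIdxList S.toList 0) 0
    rw [← List.head?_eq_getElem?] at h
    simpa [ha] using h
  have hm1 : PySem.List.pyGet? (pvIdxList S.toList 0) (-1) = some b := by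
    simpa [PySem.List.pyGet?, PySem.List.pyIdx?, hl1, ← List.getLast?_eq_getElem?] using hb
  have hfirst : pvFirstDigit S.toList 0 = some a := by
    rw [pvFirstDigit_eq_head?]; exact ha
  have hlast : pvLastDigit S.toList.reverse ((S.toList.length : Int) - 1) = some b := by
    have h := pvLastDigit_eq_getLast? S.toList 0
    rw [hb] at h
    simpa using h
  unfold Spec_Search_number_String Search_number_String Search_number_String_alt
  rw [pvIdxList_eq_foldl]
  simp only [h0, hm1, hfirst, hlast, Option.getD_some]
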